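-- pv_equiv track=rewrite | github.com/BaiduEffeciencyCloud/rag-wh40k-folk | intent_training/pipeline.py | _extract_slots_from_conll
-- ===== SOURCE A (Python) =====
-- from typing import List, Dict
--
-- def _extract_slots_from_conll(sentence: List[str], labels: List[str]) -> Dict[str, str]:
--     """
--     从CoNLL格式的标签中提取槽位信息
--
--     Args:
--         sentence: 句子词列表
--         labels: 标签列表
--
--     Returns:
--         槽位字典 {slot_name: slot_value}
--     """
--     slots = {}
--     current_slot = None
--     current_value = []
--     current_start = 0
--
--     for i, (word, label) in enumerate(zip(sentence, labels)):
--         if label.startswith('B-'):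
--             # 保存之前的槽位
--             if current_slot and current_value:
--                 slots[current_slot] = ''.join(current_value)
--
--             # 开始新槽位
--             current_slot = label[2:]  # 去掉'B-'前缀
--             current_value = [word]
--             current_start = i
--
--         elif label.startswith('I-') and current_slot:
--             # 继续当前槽位
--             if label[2:] == current_slot:  # 确保是同一个槽位类型
--                 current_value.append(word)
--             else:
--                 # 槽位类型不匹配，结束当前槽位
--                 if current_value:
--                     slots[current_slot] = ''.join(current_value)
--                 current_slot = None
--                 current_value = []
--
--         else:
--             # O标签或其他，结束当前槽位
--             if current_slot and current_value:
--                 slots[current_slot] = ''.join(current_value)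
--             current_slot = None
--             current_value = []
--
--     # 处理最后一个槽位
--     if current_slot and current_value:
--         slots[current_slot] = ''.join(current_value)
--
--     return slots
-- ===== SOURCE B (Python) =====
-- def _extract_slots_from_conll(sentence, labels):
--     slots = {}
--     pairs = list(zip(sentence, labels))
--     n = len(pairs)
--     i = 0
--     while i < n:
--         word, label = pairs[i]
--         if label.startswith('B-') and label[2:]:
--             name = label[2:]
--             parts = [word]
--             j = i + 1
--             while j < n and pairs[j][1].startswith('I-') and pairs[j][1][2:] == name:
--                 parts.append(pairs[j][0])
--                 j += 1
--             slots[name] = ''.join(parts)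
--             i = j
--         else:
--             i += 1
--     return slots
-- ===== Notes on version B (the rewrite author's own statement) =====
-- stated objective: alternative
-- what changed: Replaces A's single-pass state machine (current_slot/current_value carried across every token) with a nested outer/inner scan: the outer loop finds each 'B-' span start and an inner loop consumes the whole 'I-' run, assigning the slot once and resuming where the run ended.
import Mathlib
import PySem

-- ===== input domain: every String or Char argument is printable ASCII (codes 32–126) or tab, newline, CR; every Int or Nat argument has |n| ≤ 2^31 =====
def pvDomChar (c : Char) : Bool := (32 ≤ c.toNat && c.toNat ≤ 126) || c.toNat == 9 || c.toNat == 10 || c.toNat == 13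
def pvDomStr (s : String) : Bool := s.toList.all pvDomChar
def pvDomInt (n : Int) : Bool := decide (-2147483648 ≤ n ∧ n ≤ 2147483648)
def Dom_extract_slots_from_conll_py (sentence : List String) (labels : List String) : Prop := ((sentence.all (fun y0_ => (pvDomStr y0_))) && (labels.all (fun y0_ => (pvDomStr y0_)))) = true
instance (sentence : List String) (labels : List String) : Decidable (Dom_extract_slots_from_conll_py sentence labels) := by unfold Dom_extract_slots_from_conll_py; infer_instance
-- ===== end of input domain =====

-- B replaces A's flat per-token state machine with a nested outer scan / inner span-consuming loop (objective: alternative decomposition, same cost).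

-- ===== PORT A =====
-- Python truthiness of current_slot (None or '' are falsy)
def pyTruthyOptStr : Option String → Bool
  | none => false
  | some s => s != ""

-- loop body of A's for-loop over enumerate(zip(sentence, labels)); state = (slots, current_slot, current_value, current_start)
def stepA (st : PySem.Dict String String × Option String × List String × Int)
    (iwl : Int × String × String) : PySem.Dict String String × Option String × List String × Int :=
  match st, iwl with
  | (slots, cs, cv, cstart), (i, word, label) =>
    if PySem.Str.startswith label "B-" then
      ((if pyTruthyOptStr cs && !cv.isEmpty then slots.insert (cs.getD "") (PySem.Str.join "" cv) else slots),
       some (PySem.Str.slice label (some 2) none), [word], i)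
    else if PySem.Str.startswith label "I-" && pyTruthyOptStr cs then
      (if PySem.Str.slice label (some 2) none == cs.getD "" then
        (slots, cs, cv ++ [word], cstart)
      else
        ((if !cv.isEmpty then slots.insert (cs.getD "") (PySem.Str.join "" cv) else slots), none, [], cstart))
    else
      ((if pyTruthyOptStr cs && !cv.isEmpty then slots.insert (cs.getD "") (PySem.Str.join "" cv) else slots), none, [], cstart)

-- the trailing "if current_slot and current_value: slots[current_slot] = ''.join(current_value)"
def finishA (st : PySem.Dict String String × Option String × List String × Int) : PySem.Dict String String :=
  if pyTruthyOptStr st.2.1 && !st.2.2.1.isEmpty then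
    st.1.insert (st.2.1.getD "") (PySem.Str.join "" st.2.2.1)
  else st.1

def extract_slots_from_conll_py (sentence : List String) (labels : List String) : List (String × String) :=
  (finishA ((PySem.List.enumerate (sentence.zip labels) 0).foldl stepA
      (PySem.Dict.empty, none, [], (0 : Int)))).items

-- ===== PORT B =====
-- inner while loop of B: consume the run of matching 'I-name' pairs, return (collected words, rest)
def altSpan (name : String) : List (String × String) → List String × List (String × String)
  | [] => ([], [])
  | (w, lab) :: t =>
    if PySem.Str.startswith lab "I-" && (PySem.Str.slice lab (some 2) none == name) then
      let r := altSpan name t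
      (w :: r.1, r.2)
    else ([], (w, lab) :: t)

theorem altSpan_len_le (name : String) (l : List (String × String)) :
    (altSpan name l).2.length ≤ l.length := by
  induction l with
  | nil => simp [altSpan]
  | cons p t ih =>
    obtain ⟨w, lab⟩ := p
    simp only [altSpan]
    split
    · exact Nat.le_succ_of_le ih
    · exact Nat.le_refl _

-- outer while loop of B over the remaining pairs
def altOuter (slots : PySem.Dict String String) : List (String × String) → PySem.Dict String String
  | [] => slots
  | (w, lab) :: t =>
    if PySem.Str.startswith lab "B-" && (PySem.Str.slice lab (some 2) none != "") then
      let name := PySem.Str.slice lab (some 2) none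
      let r := altSpan name t
      altOuter (slots.insert name (PySem.Str.join "" (w :: r.1))) r.2
    else altOuter slots t
termination_by l => l.length
decreasing_by
  · exact Nat.lt_succ_of_le (altSpan_len_le _ _)
  · exact Nat.lt_succ_of_le (Nat.le_refl _)

def extract_slots_from_conll_py_alt (sentence : List String) (labels : List String) : List (String × String) :=
  (altOuter PySem.Dict.empty (sentence.zip labels)).items

-- ===== PRECONDITION & SPEC =====
def Spec_extract_slots_from_conll_py (sentence : List String) (labels : List String) (out : List (String × String)) : Prop := out = extract_slots_from_conll_py_alt sentence labels
instance (sentence : List String) (labels : List String) (out : List (String × String)) : Decidable (Spec_extract_slots_from_conll_py sentence labels out) := by unfold Spec_extract_slots_from_conll_py; infer_instance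

-- ===== CLAIM (what is proved, stated in full; the proofs are below) =====
def Claim_equal_extract_slots_from_conll_py : Prop := ∀ (sentence : List String) (labels : List String), Dom_extract_slots_from_conll_py sentence labels → Spec_extract_slots_from_conll_py sentence labels (extract_slots_from_conll_py sentence labels)

-- ===== LEMMAS AND PROOFS =====

-- a label cannot start with both "B-" and "I-"
theorem notBI (lab : String) (h : PySem.Str.startswith lab "B-" = true) :
    PySem.Str.startswith lab "I-" = false := by
  by_contra hI
  rw [Bool.not_eq_false] at hI
  simp only [PySem.Str.startswith_eq, PySem.Chars.startswith_iff] at h hI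
  obtain ⟨t1, h1⟩ := h
  obtain ⟨t2, h2⟩ := hI
  have e1 : ("B-".toList) = ['B','-'] := rfl
  have e2 : ("I-".toList) = ['I','-'] := rfl
  rw [e1] at h1
  rw [e2, ← h1] at h2
  simp at h2

-- main invariant: A's fold from an out-of-span state (left conjunct) / an in-span state
-- (right conjunct) computes B's nested scan
theorem conll_main : ∀ (n : Nat) (l : List (String × String)), l.length ≤ n →
    (∀ (s : Int) (slots : PySem.Dict String String) (cs : Option String) (cv : List String) (cst : Int),
      pyTruthyOptStr cs = false →
      finishA ((PySem.List.enumerate l s).foldl stepA (slots, cs, cv, cst)) = altOuter slots l)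
    ∧ (∀ (s : Int) (slots : PySem.Dict String String) (name : String) (cv : List String) (cst : Int),
      name ≠ "" → cv ≠ [] →
      finishA ((PySem.List.enumerate l s).foldl stepA (slots, some name, cv, cst)) =
        altOuter (slots.insert name (PySem.Str.join "" (cv ++ (altSpan name l).1))) (altSpan name l).2) := by
  intro n
  induction n with
  | zero =>
    intro l hl
    have hnil : l = [] := List.eq_nil_of_length_eq_zero (Nat.le_zero.mp hl)
    subst hnil
    constructor
    · intro s slots cs cv cst hcs
      simp [PySem.List.enumerate, finishA, altOuter, hcs]
    · intro s slots name cv cst hname hcv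
      simp [PySem.List.enumerate, finishA, altOuter, altSpan, pyTruthyOptStr, hname, hcv]
  | succ n ih =>
    intro l hl
    match l with
    | [] =>
      constructor
      · intro s slots cs cv cst hcs
        simp [PySem.List.enumerate, finishA, altOuter, hcs]
      · intro s slots name cv cst hname hcv
        simp [PySem.List.enumerate, finishA, altOuter, altSpan, pyTruthyOptStr, hname, hcv]
    | (w, lab) :: t =>
      have ht : t.length ≤ n := by simpa using Nat.succ_le_succ_iff.mp hl
      constructor
      · -- out-of-span state (current_slot falsy): A saves nothing at this token
        intro s slots cs cv cst hcs
        rw [PySem.List.enumerate_cons, List.foldl_cons]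
        by_cases hB : PySem.Str.startswith lab "B-" = true
        · have hB' : PySem.Chars.startswith lab.toList ['B', '-'] = true := by simpa using hB
          have hstep : stepA (slots, cs, cv, cst) (s, (w, lab)) =
              (slots, some (PySem.Str.slice lab (some 2) none), [w], s) := by
            simp [stepA, hB', hcs]
          rw [hstep]
          by_cases htag : PySem.Str.slice lab (some 2) none = ""
          · rw [htag, (ih t ht).1 (s + 1) slots (some "") [w] s rfl]
            simp [altOuter, hB', htag]
          · have htagb : (PySem.Str.slice lab (some 2) none != "") = true := by simp [htag]
            rw [(ih t ht).2 (s + 1) slots _ [w] s htag (by simp)]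
            simp [altOuter, hB', htagb]
        · have hB' : PySem.Chars.startswith lab.toList ['B', '-'] = false := by simpa using hB
          have hstep : stepA (slots, cs, cv, cst) (s, (w, lab)) = (slots, none, [], cst) := by
            simp [stepA, hB', hcs]
          rw [hstep, (ih t ht).1 (s + 1) slots none [] cst rfl]
          simp [altOuter, hB']
      · -- in-span state: current_slot = some name (nonempty), current_value = cv (nonempty)
        intro s slots name cv cst hname hcv
        have htr : pyTruthyOptStr (some name) = true := by simp [pyTruthyOptStr, hname]
        have hcvb : (!cv.isEmpty) = true := by simp [hcv]
        rw [PySem.List.enumerate_cons, List.foldl_cons]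
        by_cases hB : PySem.Str.startswith lab "B-" = true
        · have hB' : PySem.Chars.startswith lab.toList ['B', '-'] = true := by simpa using hB
          have hI' : PySem.Chars.startswith lab.toList ['I', '-'] = false := by
            simpa using notBI lab hB
          have hstep : stepA (slots, some name, cv, cst) (s, (w, lab)) =
              (slots.insert name (PySem.Str.join "" cv),
               some (PySem.Str.slice lab (some 2) none), [w], s) := by
            simp [stepA, hB', htr, hcvb]
          have hspan : altSpan name ((w, lab) :: t) = ([], (w, lab) :: t) := by
            simp [altSpan, hI']
          rw [hstep, hspan]
          by_cases htag : PySem.Str.slice lab (some 2) none = ""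
          · rw [htag, (ih t ht).1 (s + 1) _ (some "") [w] s rfl]
            simp [altOuter, hB', htag]
          · have htagb : (PySem.Str.slice lab (some 2) none != "") = true := by simp [htag]
            rw [(ih t ht).2 (s + 1) _ _ [w] s htag (by simp)]
            simp [altOuter, hB', htagb]
        · have hB' : PySem.Chars.startswith lab.toList ['B', '-'] = false := by simpa using hB
          by_cases hI : PySem.Str.startswith lab "I-" = true
          · have hI' : PySem.Chars.startswith lab.toList ['I', '-'] = true := by simpa using hI
            by_cases hm : PySem.Str.slice lab (some 2) none = name
            · have hstep : stepA (slots, some name, cv, cst) (s, (w, lab)) =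
                  (slots, some name, cv ++ [w], cst) := by
                simp [stepA, hB', hI', htr, hm]
              have hspan : altSpan name ((w, lab) :: t) =
                  (w :: (altSpan name t).1, (altSpan name t).2) := by
                simp [altSpan, hI', hm]
              rw [hstep, hspan,
                (ih t ht).2 (s + 1) slots name (cv ++ [w]) cst hname (by simp)]
              simp [List.append_assoc]
            · have hstep : stepA (slots, some name, cv, cst) (s, (w, lab)) =
                  (slots.insert name (PySem.Str.join "" cv), none, [], cst) := by
                simp [stepA, hB', hI', htr, hcvb, hm]
              have hspan : altSpan name ((w, lab) :: t) = ([], (w, lab) :: t) := by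
                simp [altSpan, hm]
              rw [hstep, hspan, (ih t ht).1 (s + 1) _ none [] cst rfl]
              simp [altOuter, hB']
          · have hI' : PySem.Chars.startswith lab.toList ['I', '-'] = false := by simpa using hI
            have hstep : stepA (slots, some name, cv, cst) (s, (w, lab)) =
                (slots.insert name (PySem.Str.join "" cv), none, [], cst) := by
              simp [stepA, hB', hI', htr, hcvb]
            have hspan : altSpan name ((w, lab) :: t) = ([], (w, lab) :: t) := by
              simp [altSpan, hI']
            rw [hstep, hspan, (ih t ht).1 (s + 1) _ none [] cst rfl]
            simp [altOuter, hB']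

-- ===== VERDICT (by name: the statement is the Claim_ definition above) =====
theorem extract_slots_from_conll_py_spec : Claim_equal_extract_slots_from_conll_py := by
  intro sentence labels _
  unfold Spec_extract_slots_from_conll_py extract_slots_from_conll_py extract_slots_from_conll_py_alt
  have h := ((conll_main (sentence.zip labels).length (sentence.zip labels) (Nat.le_refl _)).1
    0 PySem.Dict.empty none [] 0 rfl)
  rw [h]
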